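-- pv_equiv track=rewrite | github.com/Aasthaengg/IBMdataset | Python_codes/p03855/s403093165.py | make_union_find
-- ===== SOURCE A (Python) =====
-- def make_union_find(a, b, n):
--     union_find_tree = [i for i in range(n)]
--
--     for i in range(len(a)):
--         x = root(union_find_tree, a[i] - 1)
--         y = root(union_find_tree, b[i] - 1)
--         if x != y:
--             union_find_tree[x] = min(x, y)
--             union_find_tree[y] = union_find_tree[x]
--
--     return union_find_tree
--
-- def root(union_find_tree, target):
--     if union_find_tree[target] == target:
--         return target
--     else:
--         union_find_tree[target] = root(
--             union_find_tree, union_find_tree[target])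
--         return union_find_tree[target]
-- ===== SOURCE B (Python) =====
-- def make_union_find(a, b, n):
--     tree = list(range(n))
--     for u, v in zip(a, b):
--         x = _find(tree, u - 1)
--         y = _find(tree, v - 1)
--         if x != y:
--             r = min(x, y)
--             tree[x] = r
--             tree[y] = r
--     return tree
--
--
-- def _find(tree, t):
--     # pass 1: follow parent pointers to the root
--     r = t
--     while tree[r] != r:
--         r = tree[r]
--     # pass 2: full path compression, iteratively
--     while t != r:
--         tree[t], t = r, tree[t]
--     return r
-- ===== Notes on version B (the rewrite author's own statement) =====
-- stated objective: alternative
-- what changed: The recursive find-with-path-compression helper is replaced by an iterative two-pass find (one loop to locate the root, a second loop repointing every node on the path), and the outer loop iterates over zip(a, b) instead of indexing by range(len(a)); the resulting parent array is identical.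
import Mathlib
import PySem

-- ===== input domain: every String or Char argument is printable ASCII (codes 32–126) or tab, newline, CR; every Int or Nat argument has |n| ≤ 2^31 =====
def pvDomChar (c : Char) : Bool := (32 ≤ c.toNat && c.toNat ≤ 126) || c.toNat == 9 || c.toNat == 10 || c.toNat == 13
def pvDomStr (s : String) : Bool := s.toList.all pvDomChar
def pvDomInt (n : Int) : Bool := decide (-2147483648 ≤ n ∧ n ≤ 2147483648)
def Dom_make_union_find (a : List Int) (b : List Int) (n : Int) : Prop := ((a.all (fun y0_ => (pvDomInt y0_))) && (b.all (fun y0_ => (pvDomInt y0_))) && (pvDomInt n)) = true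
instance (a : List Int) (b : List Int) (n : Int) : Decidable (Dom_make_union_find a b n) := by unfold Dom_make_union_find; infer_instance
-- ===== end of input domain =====

-- B replaces A's recursive find-with-full-path-compression by an iterative two-pass find
-- (locate the root, then repoint every node on the path) and folds over zip(a,b) instead of
-- indexing by range(len(a)); same resulting parent array (objective: alternative).

-- ===== PORT A =====
-- tree[t] with Python's negative-index rule; default 0 is unreachable under Pre_ (Python raises there)
def getI (xs : List Int) (i : Int) : Int := (PySem.List.pyGet? xs i).getD 0

-- recursive `root` helper; the fuel argument only guards termination (Python has none) and is
-- always sufficient under Pre_ (chains strictly decrease, see the lemmas below)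
def rootA : Nat → List Int → Int → List Int × Int
  | 0, tree, t => (tree, t)
  | f+1, tree, t =>
    let v := getI tree t
    if v = t then (tree, t)
    else
      let p := rootA f tree v
      let tr := PySem.List.pySetD p.1 t p.2
      (tr, getI tr t)                      -- Python returns union_find_tree[target] after the write

def make_union_find (a : List Int) (b : List Int) (n : Int) : List Int :=
  (PySem.List.pyRange 0 (a.length : Int) 1).foldl (fun tree i =>
      let p1 := rootA (tree.length + 1) tree (getI a i - 1)
      let x := p1.2
      let p2 := rootA (p1.1.length + 1) p1.1 (getI b i - 1)
      let y := p2.2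
      if x ≠ y then
        let t3 := PySem.List.pySetD p2.1 x (min x y)
        PySem.List.pySetD t3 y (getI t3 x)  -- union_find_tree[y] = union_find_tree[x]
      else p2.1)
    (PySem.List.pyRange 0 n 1)

-- ===== PORT B =====
-- pass 1: follow parent pointers to the root (iterative; fuel guards termination only)
def findRootB : Nat → List Int → Int → Int
  | 0, _, r => r
  | f+1, tree, r =>
    let v := getI tree r
    if v = r then r else findRootB f tree v

-- pass 2: full path compression, iteratively
def compressB : Nat → List Int → Int → Int → List Int
  | 0, tree, _, _ => tree
  | f+1, tree, t, r =>
    if t = r then tree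
    else
      let nxt := getI tree t
      compressB f (PySem.List.pySetD tree t r) nxt r

def findB (tree : List Int) (t : Int) : List Int × Int :=
  let r := findRootB (tree.length + 1) tree t
  (compressB (tree.length + 1) tree t r, r)

def make_union_find_alt (a : List Int) (b : List Int) (n : Int) : List Int :=
  (a.zip b).foldl (fun tree uv =>
      let p1 := findB tree (uv.1 - 1)
      let x := p1.2
      let p2 := findB p1.1 (uv.2 - 1)
      let y := p2.2
      if x ≠ y then
        let r := min x y
        PySem.List.pySetD (PySem.List.pySetD p2.1 x r) y r
      else p2.1)
    (PySem.List.pyRange 0 n 1)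

-- ===== PRECONDITION & SPEC =====
-- Pre_ is exactly the no-raise condition: b is at least as long as a (Python reads b[i] for every
-- i < len(a)) and every index u-1 read from a (and from the used prefix of b) is a valid Python
-- index into the n-cell array, i.e. 1-n ≤ u ≤ n (negative indices wrap and are kept inside Pre_).
def Pre_make_union_find (a : List Int) (b : List Int) (n : Int) : Prop :=
  a.length ≤ b.length ∧
  (∀ u ∈ a, 1 - n ≤ u ∧ u ≤ n) ∧
  (∀ v ∈ b.take a.length, 1 - n ≤ v ∧ v ≤ n)
instance (a : List Int) (b : List Int) (n : Int) : Decidable (Pre_make_union_find a b n) := by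
  unfold Pre_make_union_find; infer_instance

def pvWitness_make_union_find : List Int × List Int × Int := ([1, 2, 5, 0], [2, 3, 4, 5], 5)

def Spec_make_union_find (a : List Int) (b : List Int) (n : Int) (out : List Int) : Prop := out = make_union_find_alt a b n
instance (a : List Int) (b : List Int) (n : Int) (out : List Int) : Decidable (Spec_make_union_find a b n out) := by unfold Spec_make_union_find; infer_instance

-- ===== CLAIM (what is proved, stated in full; the proofs are below) =====
def Claim_equal_make_union_find : Prop := ∀ (a : List Int) (b : List Int) (n : Int), Dom_make_union_find a b n → Pre_make_union_find a b n → Spec_make_union_find a b n (make_union_find a b n)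

-- ===== LEMMAS AND PROOFS =====

-- the union-find invariant: every cell holds a nonnegative parent no larger than its own index
def InvT (tree : List Int) : Prop :=
  ∀ (i : Nat) (h : i < tree.length), 0 ≤ tree[i] ∧ tree[i] ≤ (i : Int)

theorem getI_natCast (xs : List Int) (v : Nat) (h : v < xs.length) :
    getI xs (v : Int) = xs[v] := by
  simp [getI, PySem.List.pyGet?_natCast, List.getElem?_eq_getElem h]

theorem setI_natCast (xs : List Int) (v : Nat) (x : Int) :
    PySem.List.pySetD xs (v : Int) x = xs.set v x := by
  simp [PySem.List.pySetD_natCast]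

theorem getI_neg (xs : List Int) (t : Int) (h1 : -(xs.length : Int) ≤ t) (h2 : t < 0) :
    getI xs t = xs[(t + xs.length).toNat]'(by omega) := by
  have hidx : xs.length - (-t).toNat = (t + xs.length).toNat := by omega
  have hlt : (t + xs.length).toNat < xs.length := by omega
  simp only [getI, PySem.List.pyGet?, PySem.List.pyIdx?, if_neg (not_le.2 h2), if_pos h1,
    Option.bind_some, hidx]
  rw [List.getElem?_eq_getElem hlt]
  rfl

theorem setI_neg (xs : List Int) (t : Int) (x : Int) (h1 : -(xs.length : Int) ≤ t) (h2 : t < 0) :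
    PySem.List.pySetD xs t x = xs.set (t + xs.length).toNat x := by
  have hidx : xs.length - (-t).toNat = (t + xs.length).toNat := by omega
  simp [PySem.List.pySetD, PySem.List.pySet?, PySem.List.pyIdx?, if_neg (not_le.2 h2), if_pos h1,
    hidx]

theorem InvT_set (tree : List Int) (hInv : InvT tree) (k : Nat) (x : Int)
    (hx0 : 0 ≤ x) (hxk : x ≤ (k : Int)) : InvT (tree.set k x) := by
  intro i hi
  simp only [List.length_set] at hi
  by_cases hik : i = k
  · subst hik
    simpa [List.getElem_set_self hi] using And.intro hx0 hxk
  · rw [List.getElem_set_ne (by omega)]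
    exact hInv i hi

-- pass-1 (findRootB) facts: fuel-stability, bounds, and the root property
theorem findRootB_facts (tree : List Int) (hInv : InvT tree) :
    ∀ v : Nat, v < tree.length → ∀ f g : Nat, v < f → v < g →
      findRootB f tree (v : Int) = findRootB g tree (v : Int) ∧
      0 ≤ findRootB f tree (v : Int) ∧
      findRootB f tree (v : Int) ≤ (v : Int) ∧
      getI tree (findRootB f tree (v : Int)) = findRootB f tree (v : Int) := by
  intro v
  induction v using Nat.strong_induction_on with
  | _ v IH =>
    intro hv f g hf hg
    obtain ⟨f', rfl⟩ : ∃ f', f = f' + 1 := ⟨f - 1, by omega⟩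
    obtain ⟨g', rfl⟩ : ∃ g', g = g' + 1 := ⟨g - 1, by omega⟩
    simp only [findRootB, getI_natCast tree v hv]
    by_cases hroot : tree[v] = (v : Int)
    · simp [hroot, getI_natCast tree v hv]
    · obtain ⟨h0, hle⟩ := hInv v hv
      have hw : tree[v] < (v : Int) := lt_of_le_of_ne hle hroot
      have hwn : tree[v].toNat < v := by omega
      have hcast : ((tree[v].toNat : Nat) : Int) = tree[v] := by omega
      rw [if_neg hroot, if_neg hroot, ← hcast]
      obtain ⟨e1, e2, e3, e4⟩ := IH tree[v].toNat hwn (by omega) f' g' (by omega) (by omega)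
      exact ⟨e1, e2, le_trans e3 (by omega), e4⟩

-- findRootB reads only cells ≤ its (nonnegative) start, so a write above the start is invisible
theorem findRootB_set_high (tree : List Int) (hInv : InvT tree) (k : Nat) (x : Int) :
    ∀ f : Nat, ∀ v : Nat, v < tree.length → v < k →
      findRootB f (tree.set k x) (v : Int) = findRootB f tree (v : Int) := by
  intro f
  induction f with
  | zero => intro v _ _; rfl
  | succ f IH =>
    intro v hv hvk
    have hv' : v < (tree.set k x).length := by simpa using hv
    have hget : (tree.set k x)[v]'hv' = tree[v] :=
      List.getElem_set_ne (i := k) (j := v) (by omega) hv'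
    simp only [findRootB, getI_natCast _ v hv', getI_natCast tree v hv, hget]
    by_cases hroot : tree[v] = (v : Int)
    · simp [hroot]
    · obtain ⟨h0, hle⟩ := hInv v hv
      have hwn : tree[v].toNat < v := by omega
      have hcast : ((tree[v].toNat : Nat) : Int) = tree[v] := by omega
      rw [if_neg hroot, if_neg hroot, ← hcast]
      exact IH tree[v].toNat (by omega) (by omega)

theorem compressB_length : ∀ (f : Nat) (tree : List Int) (t r : Int),
    (compressB f tree t r).length = tree.length := by
  intro f
  induction f with
  | zero => intro tree t r; rfl
  | succ f IH =>
    intro tree t r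
    simp only [compressB]
    by_cases h : t = r
    · simp [h]
    · rw [if_neg h, IH, PySem.List.length_pySetD]

-- if v is not its own parent, one findRootB step descends to the (smaller) parent
theorem root_step (tree : List Int) (hInv : InvT tree) (v : Nat) (hv : v < tree.length)
    (hroot : tree[v] ≠ (v : Int)) :
    0 ≤ tree[v] ∧ tree[v].toNat < v ∧
    findRootB (v + 1) tree (v : Int) = findRootB (tree[v].toNat + 1) tree (tree[v].toNat : Int) := by
  obtain ⟨h0, hle⟩ := hInv v hv
  have hwn : tree[v].toNat < v := by omega
  have hcast : ((tree[v].toNat : Nat) : Int) = tree[v] := by omega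
  refine ⟨h0, hwn, ?_⟩
  have hstep : findRootB (v + 1) tree (v : Int) = findRootB v tree tree[v] := by
    simp only [findRootB, getI_natCast tree v hv]
    rw [if_neg hroot]
  rw [hstep, ← hcast]
  exact (findRootB_facts tree hInv tree[v].toNat (by omega) v (tree[v].toNat + 1)
    (by omega) (by omega)).1

-- if v is its own parent, findRootB returns v at once
theorem root_self (tree : List Int) (v : Nat) (hv : v < tree.length)
    (hroot : tree[v] = (v : Int)) (f : Nat) :
    findRootB (f + 1) tree (v : Int) = (v : Int) := by
  simp [findRootB, getI_natCast tree v hv, hroot]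

theorem root_self' (tree : List Int) (v : Nat) (hv : v < tree.length)
    (hroot : tree[v] = (v : Int)) (f : Nat) (hf : 0 < f) :
    findRootB f tree (v : Int) = (v : Int) := by
  obtain ⟨f', rfl⟩ : ∃ f', f = f' + 1 := ⟨f - 1, by omega⟩
  exact root_self tree v hv hroot f'

theorem compressB_self : ∀ (f : Nat) (tree : List Int) (r : Int),
    compressB f tree r r = tree := by
  intro f tree r
  cases f with
  | zero => rfl
  | succ f => simp [compressB]

theorem getI_set_neg (xs : List Int) (t x : Int) (h1 : -(xs.length : Int) ≤ t) (h2 : t < 0) :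
    getI (xs.set (t + xs.length).toNat x) t = x := by
  have hl : (xs.set (t + xs.length).toNat x).length = xs.length := List.length_set
  rw [getI_neg (xs.set (t + xs.length).toNat x) t (by rw [hl]; omega) h2]
  simp only [hl]
  exact List.getElem_set_self (by omega)

theorem compressB_inv :
    ∀ v : Nat, ∀ tree : List Int, InvT tree → v < tree.length → ∀ f : Nat,
      InvT (compressB f tree (v : Int) (findRootB (v + 1) tree (v : Int))) := by
  intro v
  induction v using Nat.strong_induction_on with
  | _ v IH =>
    intro tree hInv hv f
    cases f with
    | zero => exact hInv
    | succ f =>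
      by_cases hvr : (v : Int) = findRootB (v + 1) tree (v : Int)
      · simp only [compressB]
        rw [if_pos hvr]
        exact hInv
      · have hroot : tree[v] ≠ (v : Int) := by
          intro h
          exact hvr (root_self tree v hv h v).symm
        obtain ⟨h0, hwn, hdesc⟩ := root_step tree hInv v hv hroot
        obtain ⟨_, hr0, hrle, _⟩ := findRootB_facts tree hInv v hv (v + 1) (v + 1)
          (by omega) (by omega)
        have hcast : ((tree[v].toNat : Nat) : Int) = tree[v] := by omega
        simp only [compressB, if_neg hvr, getI_natCast tree v hv,
          setI_natCast tree v _]
        rw [← hcast]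
        have hInv' : InvT (tree.set v (findRootB (v + 1) tree (v : Int))) :=
          InvT_set tree hInv v _ hr0 hrle
        have hr' : findRootB (tree[v].toNat + 1)
            (tree.set v (findRootB (v + 1) tree (v : Int))) (tree[v].toNat : Int)
            = findRootB (v + 1) tree (v : Int) := by
          rw [findRootB_set_high tree hInv v _ (tree[v].toNat + 1) tree[v].toNat
            (by omega) hwn]
          exact (hdesc).symm
        have h2 := IH tree[v].toNat hwn _ hInv'
          (by simpa using (by omega : tree[v].toNat < tree.length)) f
        rw [hr'] at h2
        exact h2

-- compression from v only touches cells ≤ v, so it commutes with a write at a higher cell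
theorem compressB_set_comm :
    ∀ v : Nat, ∀ tree : List Int, InvT tree → v < tree.length →
      ∀ (k : Nat) (x : Int) (f : Nat), k < tree.length → v < k →
      compressB f (tree.set k x) (v : Int) (findRootB (v + 1) tree (v : Int))
        = (compressB f tree (v : Int) (findRootB (v + 1) tree (v : Int))).set k x := by
  intro v
  induction v using Nat.strong_induction_on with
  | _ v IH =>
    intro tree hInv hv k x f hk hvk
    cases f with
    | zero => rfl
    | succ f =>
      by_cases hvr : (v : Int) = findRootB (v + 1) tree (v : Int)
      · simp only [compressB]
        rw [if_pos hvr, if_pos hvr]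
      · have hroot : tree[v] ≠ (v : Int) := by
          intro h; exact hvr (root_self tree v hv h v).symm
        obtain ⟨h0, hwn, hdesc⟩ := root_step tree hInv v hv hroot
        obtain ⟨_, hr0, hrle, _⟩ := findRootB_facts tree hInv v hv (v + 1) (v + 1)
          (by omega) (by omega)
        have hv' : v < (tree.set k x).length := by simpa using hv
        have hgetk : (tree.set k x)[v]'hv' = tree[v] :=
          List.getElem_set_ne (i := k) (j := v) (by omega) hv'
        have hcast : ((tree[v].toNat : Nat) : Int) = tree[v] := by omega
        have hInv' : InvT (tree.set v (findRootB (v + 1) tree (v : Int))) :=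
          InvT_set tree hInv v _ hr0 hrle
        have hr' : findRootB (tree[v].toNat + 1)
            (tree.set v (findRootB (v + 1) tree (v : Int))) (tree[v].toNat : Int)
            = findRootB (v + 1) tree (v : Int) := by
          rw [findRootB_set_high tree hInv v _ (tree[v].toNat + 1) tree[v].toNat
            (by omega) hwn]
          exact hdesc.symm
        simp only [compressB]
        rw [if_neg hvr, if_neg hvr, getI_natCast _ v hv', hgetk, getI_natCast tree v hv,
          setI_natCast, setI_natCast,
          List.set_comm _ _ (by omega : k ≠ v), ← hcast]
        have h2 := IH tree[v].toNat hwn (tree.set v (findRootB (v + 1) tree (v : Int)))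
          hInv' (by simpa using (by omega : tree[v].toNat < tree.length)) k x f
          (by simpa using hk) (by omega)
        rw [hr'] at h2
        exact h2

-- the heart: recursive compression = find-the-root then iterative compression (nonnegative start)
theorem rootA_eq_findB_nat (tree : List Int) (hInv : InvT tree) :
    ∀ v : Nat, v < tree.length → ∀ f : Nat, v < f →
      rootA f tree (v : Int) = (compressB f tree (v : Int) (findRootB f tree (v : Int)),
                                findRootB f tree (v : Int)) := by
  intro v
  induction v using Nat.strong_induction_on with
  | _ v IH =>
    intro hv f hf
    obtain ⟨f', rfl⟩ : ∃ f', f = f' + 1 := ⟨f - 1, by omega⟩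
    by_cases hroot : tree[v] = (v : Int)
    · rw [root_self tree v hv hroot f']
      simp only [rootA, compressB, getI_natCast tree v hv]
      simp [hroot]
    · obtain ⟨h0, hwn, hdesc⟩ := root_step tree hInv v hv hroot
      have hcast : ((tree[v].toNat : Nat) : Int) = tree[v] := by omega
      have hwlen : tree[v].toNat < tree.length := by omega
      have hstep : findRootB (f' + 1) tree (v : Int) = findRootB f' tree tree[v] := by
        simp only [findRootB, getI_natCast tree v hv]
        rw [if_neg hroot]
      obtain ⟨hstab, hr0, hrle, _⟩ := findRootB_facts tree hInv tree[v].toNat hwlen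
        f' (tree[v].toNat + 1) (by omega) (by omega)
      rw [hcast] at hstab hr0 hrle
      have hIH := IH tree[v].toNat hwn hwlen f' (by omega)
      rw [hcast] at hIH
      have hvr : (v : Int) ≠ findRootB (f' + 1) tree (v : Int) := by rw [hstep]; omega
      -- unfold A one step and use the IH at the parent
      simp only [rootA, getI_natCast tree v hv]
      rw [if_neg hroot, hIH]
      -- A's write and read-back
      have hlenc : (compressB f' tree tree[v] (findRootB f' tree tree[v])).length
          = tree.length := compressB_length f' tree _ _
      rw [setI_natCast _ v _]
      have hvlt' : v < ((compressB f' tree tree[v] (findRootB f' tree tree[v])).set v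
          (findRootB f' tree tree[v])).length := by
        simpa [hlenc] using hv
      have hget2 : getI ((compressB f' tree tree[v] (findRootB f' tree tree[v])).set v
          (findRootB f' tree tree[v])) (v : Int) = findRootB f' tree tree[v] := by
        rw [getI_natCast _ v hvlt']
        exact List.getElem_set_self (by simpa [hlenc] using hv)
      rw [hget2]
      -- B side: one compression step then the write-commutation lemma
      have hcomp : compressB (f' + 1) tree (v : Int) (findRootB (f' + 1) tree (v : Int))
          = compressB f' (tree.set v (findRootB (f' + 1) tree (v : Int)))
              tree[v] (findRootB (f' + 1) tree (v : Int)) := by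
        simp only [compressB]
        rw [if_neg hvr, getI_natCast tree v hv, setI_natCast]
      have hcc := compressB_set_comm tree[v].toNat tree hInv hwlen v
        (findRootB (f' + 1) tree (v : Int)) f' hv hwn
      rw [hcast, ← hstab, hstep] at hcc
      rw [hstep] at hcomp
      rw [hstep, hcomp, hcc]

-- the full statement at an arbitrary (possibly negative, wrapping) Python index
theorem findB_spec (tree : List Int) (t : Int) (hInv : InvT tree)
    (h1 : -(tree.length : Int) ≤ t) (h2 : t < (tree.length : Int)) :
    rootA (tree.length + 1) tree t = findB tree t ∧
    0 ≤ (findB tree t).2 ∧ (findB tree t).2 < (tree.length : Int) ∧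
    (findB tree t).1.length = tree.length ∧ InvT (findB tree t).1 := by
  by_cases hpos : 0 ≤ t
  · -- nonnegative index
    have hv : t.toNat < tree.length := by omega
    have hcast : ((t.toNat : Nat) : Int) = t := by omega
    obtain ⟨hstab, hr0, hrle, _⟩ := findRootB_facts tree hInv t.toNat hv
      (tree.length + 1) (t.toNat + 1) (by omega) (by omega)
    rw [hcast] at hstab hr0 hrle
    have hIH := rootA_eq_findB_nat tree hInv t.toNat hv (tree.length + 1) (by omega)
    rw [hcast] at hIH
    have hInvC := compressB_inv t.toNat tree hInv hv (tree.length + 1)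
    rw [hcast, ← hstab] at hInvC
    refine ⟨by simpa [findB] using hIH, hr0, ?_, compressB_length _ _ _ _, hInvC⟩
    simp only [findB]
    omega
  · -- negative index (Python wraparound)
    have hneg : t < 0 := by omega
    have htn : (t + tree.length).toNat < tree.length := by omega
    have hget : getI tree t = tree[(t + tree.length).toNat]'htn := getI_neg tree t h1 hneg
    obtain ⟨hw0, hwle⟩ := hInv (t + tree.length).toNat htn
    have hwlen : (tree[(t + tree.length).toNat]'htn).toNat < tree.length := by omega
    have hcastw : (((tree[(t + tree.length).toNat]'htn).toNat : Nat) : Int)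
        = tree[(t + tree.length).toNat]'htn := by omega
    have hwt : getI tree t ≠ t := by rw [hget]; omega
    -- the parent w and its root r₀
    obtain ⟨hstab, hr0, hrle, _⟩ := findRootB_facts tree hInv
      (tree[(t + tree.length).toNat]'htn).toNat hwlen
      tree.length ((tree[(t + tree.length).toNat]'htn).toNat + 1) (by omega) (by omega)
    rw [hcastw] at hstab hr0 hrle
    have hIH := rootA_eq_findB_nat tree hInv (tree[(t + tree.length).toNat]'htn).toNat hwlen
      tree.length (by omega)
    rw [hcastw] at hIH
    have hInvC := compressB_inv (tree[(t + tree.length).toNat]'htn).toNat tree hInv hwlen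
      tree.length
    rw [hcastw, ← hstab] at hInvC
    have hrfind : findRootB (tree.length + 1) tree t
        = findRootB tree.length tree (tree[(t + tree.length).toNat]'htn) := by
      simp only [findRootB, hget]
      rw [if_neg (by omega)]
    have hrlt : findRootB tree.length tree (tree[(t + tree.length).toNat]'htn)
        ≤ (t + tree.length) := by omega
    have hlenC : (compressB tree.length tree (tree[(t + tree.length).toNat]'htn)
        (findRootB tree.length tree (tree[(t + tree.length).toNat]'htn))).length
        = tree.length := compressB_length _ _ _ _
    -- A's step: recursive call, write at t, read back
    have hsetA : PySem.List.pySetD (compressB tree.length tree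
        (tree[(t + tree.length).toNat]'htn)
        (findRootB tree.length tree (tree[(t + tree.length).toNat]'htn))) t
        (findRootB tree.length tree (tree[(t + tree.length).toNat]'htn))
        = (compressB tree.length tree (tree[(t + tree.length).toNat]'htn)
            (findRootB tree.length tree (tree[(t + tree.length).toNat]'htn))).set
            (t + tree.length).toNat
            (findRootB tree.length tree (tree[(t + tree.length).toNat]'htn)) := by
      rw [setI_neg _ t _ (by omega) hneg, hlenC]
    have hA : rootA (tree.length + 1) tree t
        = ((compressB tree.length tree (tree[(t + tree.length).toNat]'htn)
            (findRootB tree.length tree (tree[(t + tree.length).toNat]'htn))).set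
            (t + tree.length).toNat
            (findRootB tree.length tree (tree[(t + tree.length).toNat]'htn)),
           findRootB tree.length tree (tree[(t + tree.length).toNat]'htn)) := by
      simp only [rootA, hget]
      rw [if_neg (by omega), hIH, hsetA]
      congr 1
      have := getI_set_neg (compressB tree.length tree (tree[(t + tree.length).toNat]'htn)
        (findRootB tree.length tree (tree[(t + tree.length).toNat]'htn)))
        t (findRootB tree.length tree (tree[(t + tree.length).toNat]'htn))
        (by rw [hlenC]; omega) hneg
      rw [hlenC] at this
      exact this
    -- B's step: one compression step, then commute the write at (t+len) past the
    -- compression of the (strictly lower) chain of w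
    have hB : compressB (tree.length + 1) tree t
          (findRootB (tree.length + 1) tree t)
        = ((compressB tree.length tree (tree[(t + tree.length).toNat]'htn)
            (findRootB tree.length tree (tree[(t + tree.length).toNat]'htn))).set
            (t + tree.length).toNat
            (findRootB tree.length tree (tree[(t + tree.length).toNat]'htn))) := by
      rw [hrfind]
      simp only [compressB, hget]
      rw [if_neg (by omega), setI_neg _ t _ (by omega) hneg]
      by_cases hwtn : (tree[(t + tree.length).toNat]'htn).toNat = (t + tree.length).toNat
      · -- the wrapped cell is its own parent: everything collapses at once
        have hroot : tree[(t + tree.length).toNat]'htn = ((t + tree.length).toNat : Int) := by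
          omega
        have hre : findRootB tree.length tree (tree[(t + tree.length).toNat]'htn)
            = tree[(t + tree.length).toNat]'htn := by
          rw [hroot]
          exact root_self' tree (t + tree.length).toNat (by omega) hroot tree.length
            (by omega)
        rw [hre, compressB_self, compressB_self]
      · -- strictly lower parent: use the commutation lemma
        have hwlt : (tree[(t + tree.length).toNat]'htn).toNat < (t + tree.length).toNat := by
          omega
        have hcc := compressB_set_comm (tree[(t + tree.length).toNat]'htn).toNat tree hInv
          hwlen (t + tree.length).toNat
          (findRootB tree.length tree (tree[(t + tree.length).toNat]'htn)) tree.length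
          htn hwlt
        rw [hcastw, ← hstab] at hcc
        exact hcc
    have hInvR : InvT ((compressB tree.length tree (tree[(t + tree.length).toNat]'htn)
        (findRootB tree.length tree (tree[(t + tree.length).toNat]'htn))).set
        (t + tree.length).toNat
        (findRootB tree.length tree (tree[(t + tree.length).toNat]'htn))) := by
      have := InvT_set _ hInvC (t + tree.length).toNat _ hr0 (by omega)
      simpa [hlenC] using this
    refine ⟨?_, ?_, ?_, ?_, ?_⟩
    · rw [hrfind] at hB
      simp only [findB]
      rw [hA, hrfind, hB]
    · simpa [findB, hrfind] using hr0
    · simp only [findB]; rw [hrfind]; omega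
    · simp only [findB, hB]; simp [hlenC]
    · simpa [findB, hB] using hInvR

theorem getI_pySetD_self (xs : List Int) (i x : Int) (h0 : 0 ≤ i)
    (hl : i < (xs.length : Int)) :
    getI (PySem.List.pySetD xs i x) i = x := by
  rw [PySem.List.pySetD_of_nonneg xs x h0]
  have hk : i.toNat < xs.length := by omega
  have hc : ((i.toNat : Nat) : Int) = i := by omega
  calc getI (xs.set i.toNat x) i
      = getI (xs.set i.toNat x) ((i.toNat : Nat) : Int) := by rw [hc]
    _ = x := by
        rw [getI_natCast _ i.toNat (by simpa using hk)]
        exact List.getElem_set_self (by simpa using hk)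

-- one union step, as it appears in each port's fold body
def stepA (tree : List Int) (u v : Int) : List Int :=
  let p1 := rootA (tree.length + 1) tree (u - 1)
  let x := p1.2
  let p2 := rootA (p1.1.length + 1) p1.1 (v - 1)
  let y := p2.2
  if x ≠ y then
    let t3 := PySem.List.pySetD p2.1 x (min x y)
    PySem.List.pySetD t3 y (getI t3 x)
  else p2.1

def stepB (tree : List Int) (u v : Int) : List Int :=
  let p1 := findB tree (u - 1)
  let x := p1.2
  let p2 := findB p1.1 (v - 1)
  let y := p2.2
  if x ≠ y then
    let r := min x y
    PySem.List.pySetD (PySem.List.pySetD p2.1 x r) y r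
  else p2.1

-- one union step of A equals one union step of B (and preserves invariant and length)
theorem step_eq (tree : List Int) (hInv : InvT tree) (u v : Int)
    (hu1 : -(tree.length : Int) ≤ u - 1) (hu2 : u - 1 < (tree.length : Int))
    (hv1 : -(tree.length : Int) ≤ v - 1) (hv2 : v - 1 < (tree.length : Int)) :
    stepA tree u v = stepB tree u v ∧ InvT (stepB tree u v) ∧
    (stepB tree u v).length = tree.length := by
  obtain ⟨hA1, hx0, hxlt, hlen1, hInv1⟩ := findB_spec tree (u - 1) hInv hu1 hu2
  obtain ⟨hA2, hy0, hylt, hlen2, hInv2⟩ := findB_spec (findB tree (u - 1)).1 (v - 1) hInv1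
    (by rw [hlen1]; exact hv1) (by rw [hlen1]; exact hv2)
  simp only [stepA, stepB]
  rw [hA1, hA2]
  set p1 := findB tree (u - 1) with hp1
  set p2 := findB p1.1 (v - 1) with hp2
  by_cases hxy : p1.2 = p2.2
  · simp only [if_neg (show ¬(p1.2 ≠ p2.2) from fun h => h hxy)]
    exact ⟨trivial, hInv2, hlen2.trans hlen1⟩
  · simp only [if_pos (show p1.2 ≠ p2.2 from hxy)]
    have hxlt2 : p1.2 < (p2.1.length : Int) := by rw [hlen2, hlen1]; exact hxlt
    have hread : getI (PySem.List.pySetD p2.1 p1.2 (min p1.2 p2.2)) p1.2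
        = min p1.2 p2.2 := getI_pySetD_self p2.1 p1.2 _ hx0 hxlt2
    have e1 : PySem.List.pySetD p2.1 p1.2 (min p1.2 p2.2)
        = p2.1.set p1.2.toNat (min p1.2 p2.2) := PySem.List.pySetD_of_nonneg _ _ hx0
    have e2 : PySem.List.pySetD (p2.1.set p1.2.toNat (min p1.2 p2.2)) p2.2 (min p1.2 p2.2)
        = (p2.1.set p1.2.toNat (min p1.2 p2.2)).set p2.2.toNat (min p1.2 p2.2) :=
      PySem.List.pySetD_of_nonneg _ _ hy0
    refine ⟨by rw [hread], ?_, ?_⟩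
    · rw [e1, e2]
      have h1 : InvT (p2.1.set p1.2.toNat (min p1.2 p2.2)) :=
        InvT_set p2.1 hInv2 p1.2.toNat _ (by omega) (by omega)
      exact InvT_set _ h1 p2.2.toNat _ (by omega)
        (by have := hlen2.trans hlen1; omega)
    · rw [e1, e2]
      simp [hlen2, hlen1]

-- fold the step equality over the edge list, threading the invariant
theorem fold_AB (L : Nat) : ∀ (ps : List (Int × Int)) (tree : List Int), InvT tree →
    tree.length = L →
    (∀ p ∈ ps, -(L : Int) ≤ p.1 - 1 ∧ p.1 - 1 < (L : Int) ∧
               -(L : Int) ≤ p.2 - 1 ∧ p.2 - 1 < (L : Int)) →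
    ps.foldl (fun tr p => stepA tr p.1 p.2) tree
      = ps.foldl (fun tr p => stepB tr p.1 p.2) tree := by
  intro ps
  induction ps with
  | nil => intro tree _ _ _; rfl
  | cons p ps IH =>
    intro tree hInv hL hb
    obtain ⟨h1, h2, h3, h4⟩ := hb p (List.mem_cons_self)
    rw [← hL] at h1 h2 h3 h4
    obtain ⟨heq, hInv', hlen'⟩ := step_eq tree hInv p.1 p.2 h1 h2 h3 h4
    simp only [List.foldl_cons, heq]
    exact IH (stepB tree p.1 p.2) hInv' (hlen'.trans hL)
      (fun q hq => hb q (List.mem_cons_of_mem p hq))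

-- reindex A's fold over range(len(a)) into a fold over zip(a, b)
theorem fold_range_zip (g : List Int → Int → Int → List Int) :
    ∀ (a b : List Int) (tree : List Int), a.length ≤ b.length →
      (List.range a.length).foldl (fun (tr : List Int) (k : Nat) => g tr (getI a (k : Int)) (getI b (k : Int))) tree
        = (a.zip b).foldl (fun tr p => g tr p.1 p.2) tree := by
  intro a
  induction a with
  | nil => intro b tree _; rfl
  | cons u a' IH =>
    intro b tree hlen
    cases b with
    | nil => simp at hlen
    | cons v b' =>
      rw [List.length_cons, List.range_succ_eq_map]
      simp only [List.foldl_cons, List.foldl_map, List.zip_cons_cons]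
      have hu : getI (u :: a') ((0 : Nat) : Int) = u := by
        simp [getI]
      have hv : getI (v :: b') ((0 : Nat) : Int) = v := by
        simp [getI]
      simp only [Nat.cast_zero] at hu hv ⊢
      rw [hu, hv]
      have hfun : (fun (tr : List Int) (k : Nat) =>
            g tr (getI (u :: a') ((k.succ : Nat) : Int)) (getI (v :: b') ((k.succ : Nat) : Int)))
          = fun (tr : List Int) (k : Nat) => g tr (getI a' (k : Int)) (getI b' (k : Int)) := by
        funext tr k
        have hc : ((k.succ : Nat) : Int) = (k : Int) + 1 := by push_cast; ring
        rw [hc]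
        simp [getI, PySem.List.pyGet?_cons_succ]
      rw [hfun]
      exact IH b' (g tree u v) (by simpa using hlen)

-- ===== VERDICT (by name: the statement is the Claim_ definition above) =====
theorem make_union_find_spec : Claim_equal_make_union_find := by
  intro a b n hDom hPre
  show make_union_find a b n = make_union_find_alt a b n
  obtain ⟨hlen, hA, hB⟩ := hPre
  have hAdef : make_union_find a b n
      = (PySem.List.pyRange 0 (a.length : Int) 1).foldl
          (fun tree i => stepA tree (getI a i) (getI b i)) (PySem.List.pyRange 0 n 1) := rfl
  have hBdef : make_union_find_alt a b n
      = (a.zip b).foldl (fun tree p => stepB tree p.1 p.2)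
          (PySem.List.pyRange 0 n 1) := rfl
  rw [hAdef, hBdef]
  -- A's index fold = fold over zip(a, b)
  rw [PySem.List.pyRange_one 0 (a.length : Int), List.foldl_map]
  have hfix : (fun (tr : List Int) (k : Nat) =>
        stepA tr (getI a (0 + (k : Int))) (getI b (0 + (k : Int))))
      = fun (tr : List Int) (k : Nat) => stepA tr (getI a (k : Int)) (getI b (k : Int)) := by
    funext tr k
    rw [zero_add]
  have hcnt : ((a.length : Int) - 0).toNat = a.length := by omega
  rw [hcnt, hfix, fold_range_zip stepA a b _ hlen]
  -- now both are folds of stepA/stepB over zip(a, b); compare stepwise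
  have hlen0 : (PySem.List.pyRange 0 n 1).length = n.toNat := by
    rw [PySem.List.length_pyRange_one]
    omega
  have hInv0 : InvT (PySem.List.pyRange 0 n 1) := by
    intro i hi
    rw [PySem.List.getElem_pyRange_one]
    constructor <;> omega
  refine fold_AB n.toNat (a.zip b) (PySem.List.pyRange 0 n 1) hInv0 hlen0 ?_
  intro p hp
  obtain ⟨i, hi, hpe⟩ := List.mem_iff_getElem.1 hp
  rw [List.getElem_zip] at hpe
  have hia : i < a.length := by
    have := hi; rw [List.length_zip] at this; omega
  have hib : i < b.length := by
    have := hi; rw [List.length_zip] at this; omega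
  have hp1 : p.1 = a[i]'(by omega) := by rw [← hpe]
  have hp2 : p.2 = b[i]'(by omega) := by rw [← hpe]
  obtain ⟨ha1, ha2⟩ := hA (a[i]'(by omega)) (List.getElem_mem _)
  have hbmem : (b[i]'(by omega)) ∈ b.take a.length := by
    have : (b.take a.length)[i]'(by rw [List.length_take]; omega) = b[i]'(by omega) :=
      List.getElem_take
    rw [← this]
    exact List.getElem_mem _
  obtain ⟨hb1, hb2⟩ := hB _ hbmem
  rw [hp1, hp2]
  refine ⟨by omega, by omega, by omega, by omega⟩
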